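-- pv_equiv track=rewrite | github.com/jeanallen928/coding_test | 42885_lifeboat.py | solution
-- ===== SOURCE A (Python) =====
-- def solution(people, limit):
--     answer = 0
--     people.sort()
--     while len(people) > 1:
--         if people[-1] + people[0] <= limit:
--             answer += 1
--             people = people[1:-1]
--         else:
--             people.pop()
--             answer += 1
--     if len(people) == 1:
--         answer = answer + 1
--     return answer
-- ===== SOURCE B (Python) =====
-- def solution(people, limit):
--     p = sorted(people)
--     i, j = 0, len(p) - 1
--     boats = 0
--     while i < j:
--         if p[i] + p[j] <= limit:
--             i += 1
--         j -= 1
--         boats += 1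
--     return boats + (1 if i == j else 0)
-- ===== Notes on version B (the rewrite author's own statement) =====
-- stated objective: faster
-- what changed: Replaced the while-loop that repeatedly slices/pops the list (O(n) copy per boat) by a two-pointer sweep over the sorted list using index arithmetic only.
import Mathlib
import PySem

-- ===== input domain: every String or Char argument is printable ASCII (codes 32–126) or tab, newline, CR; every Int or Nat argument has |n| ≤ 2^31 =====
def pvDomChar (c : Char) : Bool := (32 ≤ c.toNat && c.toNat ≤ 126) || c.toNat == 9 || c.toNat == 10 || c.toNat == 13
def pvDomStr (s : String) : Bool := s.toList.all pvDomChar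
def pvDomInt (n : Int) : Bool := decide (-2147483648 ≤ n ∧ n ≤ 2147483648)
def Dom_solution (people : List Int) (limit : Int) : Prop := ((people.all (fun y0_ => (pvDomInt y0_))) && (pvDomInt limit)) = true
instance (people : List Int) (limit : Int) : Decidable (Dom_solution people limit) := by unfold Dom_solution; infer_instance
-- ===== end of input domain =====

-- B replaces A's slice/pop while-loop by a two-pointer index sweep over the sorted list;
-- A sorts/pops its argument in place — the equivalence proved here is about the RETURN value only.

-- ===== PORT A =====
-- the while-loop, as structural recursion on a fuel that bounds the iteration count
-- (fuel = initial length suffices: each iteration shortens the list);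
-- people[1:-1] is PySem.List.slice, people.pop() on a list of length > 1 is dropLast
def solLoop (fuel : Nat) (people : List Int) (limit answer : Int) : Int :=
  match fuel with
  | 0 => if people.length == 1 then answer + 1 else answer
  | f + 1 =>
    if people.length > 1 then
      if PySem.List.pyGetD people (-1) 0 + PySem.List.pyGetD people 0 0 ≤ limit then
        solLoop f (PySem.List.slice people (some 1) (some (-1))) limit (answer + 1)
      else
        solLoop f people.dropLast limit (answer + 1)
    else
      if people.length == 1 then answer + 1 else answer

def solution (people : List Int) (limit : Int) : Int :=
  let p := PySem.List.sorted people id false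
  solLoop p.length p limit 0

-- ===== PORT B =====
-- the two-pointer while-loop of Source B, fuel = length bounds the iteration count (j - i shrinks each turn)
def altLoop (fuel : Nat) (p : List Int) (limit i j boats : Int) : Int :=
  match fuel with
  | 0 => boats + (if i = j then 1 else 0)
  | f + 1 =>
    if i < j then
      altLoop f p limit
        (if PySem.List.pyGetD p i 0 + PySem.List.pyGetD p j 0 ≤ limit then i + 1 else i)
        (j - 1) (boats + 1)
    else
      boats + (if i = j then 1 else 0)

def solution_alt (people : List Int) (limit : Int) : Int :=
  let p := PySem.List.sorted people id false
  altLoop p.length p limit 0 (p.length - 1) 0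

-- ===== PRECONDITION & SPEC =====
def Spec_solution (people : List Int) (limit : Int) (out : Int) : Prop := out = solution_alt people limit
instance (people : List Int) (limit : Int) (out : Int) : Decidable (Spec_solution people limit out) := by unfold Spec_solution; infer_instance

-- ===== CLAIM (what is proved, stated in full; the proofs are below) =====
def Claim_equal_solution : Prop := ∀ (people : List Int) (limit : Int), Dom_solution people limit → Spec_solution people limit (solution people limit)

-- ===== LEMMAS AND PROOFS =====

theorem solLoop_short (fuel : Nat) (people : List Int) (limit answer : Int)
    (h : ¬ people.length > 1) :
    solLoop fuel people limit answer = if people.length == 1 then answer + 1 else answer := by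
  cases fuel <;> simp [solLoop, h]

theorem altLoop_stop (fuel : Nat) (p : List Int) (limit i j boats : Int) (h : ¬ i < j) :
    altLoop fuel p limit i j boats = boats + (if i = j then 1 else 0) := by
  cases fuel <;> simp [altLoop, h]

theorem slice_one_neg_one (xs : List Int) :
    PySem.List.slice xs (some 1) (some (-1)) = xs.tail.dropLast := by
  simp [PySem.List.slice, PySem.List.clampIdx]
  rcases xs with _ | ⟨a, t⟩
  · simp
  · simp [List.dropLast_eq_take]

-- the two loops compute the same answer: A's current list is the segment p[i..j] of B's pointers
theorem loops_eq (fB : Nat) : ∀ (fA : Nat) (p : List Int) (limit i j boats : Int),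
    0 ≤ i → i ≤ j + 1 → j < p.length → (j - i).toNat ≤ fB → (j + 1 - i).toNat ≤ fA + 1 →
    altLoop fB p limit i j boats
      = solLoop fA ((p.drop i.toNat).take (j + 1 - i).toNat) limit boats := by
  induction fB with
  | zero =>
    intro fA p limit i j boats hi hij hj hfB hfA
    have hlt : ¬ i < j := by omega
    set m := (j + 1 - i).toNat with hm
    have hseglen : ((p.drop i.toNat).take m).length = m := by
      simp [List.length_take, List.length_drop]; omega
    rw [altLoop_stop 0 p limit i j boats hlt,
        solLoop_short fA _ limit boats (by omega)]
    by_cases heq : i = j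
    · have hm1 : m = 1 := by omega
      simp [hm1, heq]
      omega
    · have hm0 : m = 0 := by omega
      simp [hm0, heq]
  | succ f IH =>
    intro fA p limit i j boats hi hij hj hfB hfA
    set m := (j + 1 - i).toNat with hm
    have hseglen : ((p.drop i.toNat).take m).length = m := by
      simp [List.length_take, List.length_drop]; omega
    by_cases hlt : i < j
    · have hm2 : 2 ≤ m := by omega
      obtain ⟨g, rfl⟩ : ∃ g, fA = g + 1 := ⟨fA - 1, by omega⟩
      have hget0 : PySem.List.pyGetD ((p.drop i.toNat).take m) 0 0 = PySem.List.pyGetD p i 0 := by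
        rw [PySem.List.pyGetD_eq_getElem _ _ (by omega) (by omega),
            PySem.List.pyGetD_eq_getElem _ _ (by omega) (by omega)]
        simp [List.getElem_take, List.getElem_drop]
      have hgetL : PySem.List.pyGetD ((p.drop i.toNat).take m) (-1) 0 = PySem.List.pyGetD p j 0 := by
        have hne : (p.drop i.toNat).take m ≠ [] := by
          intro h; rw [h] at hseglen; simp at hseglen; omega
        rw [PySem.List.pyGetD_neg_one _ _ hne,
            PySem.List.pyGetD_eq_getElem _ _ (by omega) (by omega)]
        rw [List.getLast_eq_getElem]
        simp only [hseglen, List.getElem_take, List.getElem_drop]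
        congr 1
        omega
      rw [altLoop, solLoop]
      rw [if_pos hlt, if_pos (by omega : ((p.drop i.toNat).take m).length > 1)]
      rw [hget0, hgetL, add_comm (PySem.List.pyGetD p i 0) (PySem.List.pyGetD p j 0)]
      by_cases hc : PySem.List.pyGetD p j 0 + PySem.List.pyGetD p i 0 ≤ limit
      · rw [if_pos hc, if_pos hc]
        rw [slice_one_neg_one]
        have hseg' : ((p.drop i.toNat).take m).tail.dropLast
            = (p.drop (i+1).toNat).take ((j - 1) + 1 - (i + 1)).toNat := by
          rw [← List.drop_one, List.drop_take, List.drop_drop, List.dropLast_eq_take]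
          rw [List.take_take]
          congr 1
          · simp [List.length_take, List.length_drop]; omega
          · congr 1; omega
        rw [hseg']
        exact IH g p limit (i+1) (j-1) (boats+1) (by omega) (by omega) (by omega) (by omega) (by omega)
      · rw [if_neg hc, if_neg hc]
        have hseg' : ((p.drop i.toNat).take m).dropLast
            = (p.drop i.toNat).take (j - 1 + 1 - i).toNat := by
          rw [List.dropLast_eq_take, List.take_take, hseglen]
          congr 1
          omega
        rw [hseg']
        exact IH g p limit i (j-1) (boats+1) hi (by omega) (by omega) (by omega) (by omega)
    · rw [altLoop_stop _ p limit i j boats hlt,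
          solLoop_short fA _ limit boats (by omega)]
      by_cases heq : i = j
      · have hm1 : m = 1 := by omega
        simp [hm1, heq]
        omega
      · have hm0 : m = 0 := by omega
        simp [hm0, heq]

-- ===== VERDICT (by name: the statement is the Claim_ definition above) =====
theorem solution_spec : Claim_equal_solution := by
  intro people limit _
  unfold Spec_solution solution solution_alt
  set p := PySem.List.sorted people id false with hp
  rcases Nat.eq_zero_or_pos p.length with h0 | hpos
  · rw [List.length_eq_zero_iff] at h0
    rw [h0]
    simp [altLoop, solLoop]
  · have := loops_eq p.length p.length p limit 0 ((p.length : Int) - 1) 0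
      (by omega) (by omega) (by omega) (by omega) (by omega)
    rw [this]
    simp
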